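-- pv_equiv track=rewrite | github.com/sklam/codetrace | codetrace/tests/samples.py | loop5
-- ===== SOURCE A (Python) =====
-- def loop5(a):
--     c = 0
--     for i in range(a):
--         for j in range(a):
--             if c < a * 10:
--                 for i in range(a):
--                     c += i + j
--                 c += 1
--             else:
--                 for i in range(a):
--                     c += 2 * i + j
--                 c += 1
--                 break
--                 c += 1
--         else:
--             c += c
--     return c
-- ===== SOURCE B (Python) =====
-- def loop5(a):
--     # Replaces both O(a) inner i-loops with closed-form sums computed once.
--     c = 0
--     s1 = a * (a - 1) // 2      # sum of i       for i in range(a)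
--     s2 = a * (a - 1)           # sum of 2 * i   for i in range(a)
--     for _ in range(a):
--         broke = False
--         for j in range(a):
--             if c < 10 * a:
--                 c += s1 + a * j + 1
--             else:
--                 c += s2 + a * j + 1
--                 broke = True
--                 break
--         if not broke:
--             c += c
--     return c
-- ===== Notes on version B (the rewrite author's own statement) =====
-- stated objective: faster
-- what changed: Both inner i-loops over range(a) are replaced by closed-form arithmetic sums computed once before the loops, and the for-else is replaced by an explicit break flag, making each j-step constant-time.
import Mathlib
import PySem

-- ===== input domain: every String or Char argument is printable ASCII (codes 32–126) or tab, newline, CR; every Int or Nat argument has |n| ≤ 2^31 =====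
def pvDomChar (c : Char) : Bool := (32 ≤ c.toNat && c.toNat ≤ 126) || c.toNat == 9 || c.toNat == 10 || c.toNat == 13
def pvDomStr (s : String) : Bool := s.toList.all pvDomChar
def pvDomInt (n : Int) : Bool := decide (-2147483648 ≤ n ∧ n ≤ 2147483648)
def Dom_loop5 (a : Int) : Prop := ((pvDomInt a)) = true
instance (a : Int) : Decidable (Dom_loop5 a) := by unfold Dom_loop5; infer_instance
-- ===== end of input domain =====

-- B replaces the two O(a) inner i-loops by closed-form sums and the for-else by a break flag: O(a^2) instead of O(a^3).

-- ===== PORT A =====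
-- the j-loop of A, with Python's for-else: empty list ⇒ the else branch 'c += c'; the
-- else-branch of the if performs the second i-loop, 'c += 1' and breaks (code after break is dead)
def loop5_jloopA (a : Int) : List Int → Int → Int
  | [], c => c + c
  | j :: rest, c =>
    if c < a * 10 then
      loop5_jloopA a rest
        (((PySem.List.pyRange 0 a 1).foldl (fun c i => c + (i + j)) c) + 1)
    else
      ((PySem.List.pyRange 0 a 1).foldl (fun c i => c + (2 * i + j)) c) + 1

def loop5 (a : Int) : Int :=
  (PySem.List.pyRange 0 a 1).foldl
    (fun c _ => loop5_jloopA a (PySem.List.pyRange 0 a 1) c) 0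

-- ===== PORT B =====
-- the j-loop of B: returns (c, broke)
def loop5_jloopB (a s1 s2 : Int) : List Int → Int → Int × Bool
  | [], c => (c, false)
  | j :: rest, c =>
    if c < 10 * a then
      loop5_jloopB a s1 s2 rest (c + s1 + a * j + 1)
    else
      (c + s2 + a * j + 1, true)

def loop5_alt (a : Int) : Int :=
  let s1 := PySem.Int.floordiv (a * (a - 1)) 2
  let s2 := a * (a - 1)
  (PySem.List.pyRange 0 a 1).foldl
    (fun c _ =>
      let r := loop5_jloopB a s1 s2 (PySem.List.pyRange 0 a 1) c
      if r.2 then r.1 else r.1 + r.1) 0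

-- ===== PRECONDITION & SPEC =====
def Spec_loop5 (a : Int) (out : Int) : Prop := out = loop5_alt a
instance (a : Int) (out : Int) : Decidable (Spec_loop5 a out) := by unfold Spec_loop5; infer_instance

-- ===== CLAIM (what is proved, stated in full; the proofs are below) =====
def Claim_equal_loop5 : Prop := ∀ (a : Int), Dom_loop5 a → Spec_loop5 a (loop5 a)

-- ===== LEMMAS AND PROOFS =====

theorem loop5_fold1 (l : List Int) (c j : Int) :
    l.foldl (fun c i => c + (i + j)) c = c + l.sum + j * l.length := by
  induction l generalizing c with
  | nil => simp
  | cons x t ih => simp [List.foldl, ih]; ring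

theorem loop5_fold2 (l : List Int) (c j : Int) :
    l.foldl (fun c i => c + (2 * i + j)) c = c + 2 * l.sum + j * l.length := by
  induction l generalizing c with
  | nil => simp
  | cons x t ih => simp [List.foldl, ih]; ring

theorem loop5_sum_pyRange (a : Int) (ha : 0 ≤ a) :
    (PySem.List.pyRange 0 a 1).sum * 2 = a * (a - 1) := by
  induction a, ha using Int.le_induction with
  | base => rw [PySem.List.pyRange_one_eq_nil (by omega)]; simp
  | succ n hn ih =>
      rw [PySem.List.pyRange_one_succ_right (by omega), List.sum_append]
      simp only [List.sum_cons, List.sum_nil]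
      nlinarith [ih]

theorem loop5_len_pyRange (a : Int) (ha : 0 ≤ a) :
    ((PySem.List.pyRange 0 a 1).length : Int) = a := by
  rw [PySem.List.length_pyRange_one]; omega

theorem loop5_jloop_eq (a : Int) (ha : 0 ≤ a) (s1 s2 : Int)
    (hs1 : s1 = (PySem.List.pyRange 0 a 1).sum)
    (hs2 : s2 = 2 * (PySem.List.pyRange 0 a 1).sum) :
    ∀ (js : List Int) (c : Int),
      loop5_jloopA a js c =
        (let r := loop5_jloopB a s1 s2 js c; if r.2 then r.1 else r.1 + r.1) := by
  intro js
  induction js with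
  | nil => intro c; simp [loop5_jloopA, loop5_jloopB]
  | cons j rest ih =>
      intro c
      simp only [loop5_jloopA, loop5_jloopB]
      by_cases h : c < a * 10
      · rw [if_pos h, if_pos (by omega : c < 10 * a)]
        rw [loop5_fold1, loop5_len_pyRange a ha, ih]
        have : c + (PySem.List.pyRange 0 a 1).sum + j * a + 1 = c + s1 + a * j + 1 := by
          rw [hs1]; ring
        rw [this]
      · rw [if_neg h, if_neg (by omega : ¬ c < 10 * a)]
        rw [loop5_fold2, loop5_len_pyRange a ha]
        simp only [if_pos]
        rw [hs2]; ring

theorem loop5_foldl_ext {α β : Type} (f g : α → β → α) (h : ∀ c x, f c x = g c x) :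
    ∀ (l : List β) (i : α), l.foldl f i = l.foldl g i := by
  intro l
  induction l with
  | nil => intro i; rfl
  | cons x t ih => intro i; simp only [List.foldl, h, ih]

-- ===== VERDICT (by name: the statement is the Claim_ definition above) =====
theorem loop5_spec : Claim_equal_loop5 := by
  unfold Claim_equal_loop5 Spec_loop5
  intro a _
  by_cases ha : 0 ≤ a
  · unfold loop5 loop5_alt
    have hs1 : PySem.Int.floordiv (a * (a - 1)) 2 = (PySem.List.pyRange 0 a 1).sum := by
      rw [PySem.Int.floordiv_eq_ediv_of_pos (by omega), ← loop5_sum_pyRange a ha,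
        Int.mul_ediv_cancel _ (by omega)]
    have hs2 : a * (a - 1) = 2 * (PySem.List.pyRange 0 a 1).sum := by
      rw [← loop5_sum_pyRange a ha]; ring
    exact loop5_foldl_ext _ _
      (fun c _ => loop5_jloop_eq a ha _ _ hs1 hs2 (PySem.List.pyRange 0 a 1) c)
      (PySem.List.pyRange 0 a 1) 0
  · unfold loop5 loop5_alt
    rw [PySem.List.pyRange_one_eq_nil (by omega)]
    rfl
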